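-- pv_equiv track=rewrite | github.com/urdoggydeewata-star/DexEmAll | lib/register_stats.py | _resolve_most_used
-- ===== SOURCE A (Python) =====
-- from typing import Any, Dict, Iterable, Mapping, Optional, Tuple
--
-- def _resolve_most_used(usage: Mapping[str, int]) -> tuple[str, int]:
--     best_move = ""
--     best_count = 0
--     for move, raw_count in usage.items():
--         try:
--             n = int(raw_count or 0)
--         except Exception:
--             n = 0
--         if n <= 0:
--             continue
--         if n > best_count or (n == best_count and move < best_move):
--             best_move = str(move)
--             best_count = n
--     return best_move, best_count
-- ===== SOURCE B (Python) =====
-- def _clean_count(raw):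
--     try:
--         return int(raw or 0)
--     except Exception:
--         return 0
--
-- def _resolve_most_used(usage):
--     # Stage 1: clean all counts; Stage 2: find the maximum count; Stage 3: among
--     # the entries achieving that maximum, take the lexicographically smallest name.
--     cleaned = [(str(move), _clean_count(raw)) for move, raw in usage.items()]
--     best = max((n for _, n in cleaned), default=0)
--     if best <= 0:
--         return "", 0
--     name = min(move for move, n in cleaned if n == best)
--     return name, best
-- ===== Notes on version B (the rewrite author's own statement) =====
-- stated objective: alternative
-- what changed: Replaced A's single running-best loop (inline count/name tie-break comparison) by three staged passes: clean all counts, compute the maximum count with max(), then take the minimum name with min() restricted to entries achieving that maximum.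
import Mathlib
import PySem

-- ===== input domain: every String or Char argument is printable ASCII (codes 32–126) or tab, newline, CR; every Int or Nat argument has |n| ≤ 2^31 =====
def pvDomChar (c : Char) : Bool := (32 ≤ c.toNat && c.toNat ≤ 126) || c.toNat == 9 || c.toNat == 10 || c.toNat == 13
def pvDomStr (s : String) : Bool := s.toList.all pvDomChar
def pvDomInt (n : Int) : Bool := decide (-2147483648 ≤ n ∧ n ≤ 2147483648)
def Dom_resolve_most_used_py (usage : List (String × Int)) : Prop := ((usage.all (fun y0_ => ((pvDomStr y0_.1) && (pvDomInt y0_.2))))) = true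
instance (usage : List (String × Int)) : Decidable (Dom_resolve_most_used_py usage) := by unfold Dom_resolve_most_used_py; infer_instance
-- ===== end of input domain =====

-- B replaces A's single running-best loop by three staged passes (clean counts, max count via max(), min name among entries achieving it via min()); objective: alternative.

-- ===== PORT A =====
-- n = int(raw_count or 0): raw_count is an Int, so this is `if raw = 0 then 0 else raw`
def rmu_clean (raw : Int) : Int := if raw = 0 then 0 else raw

def resolve_most_used_py (usage : List (String × Int)) : String × Int :=
  usage.foldl
    (fun acc p =>
      let n := rmu_clean p.2
      if n ≤ 0 then acc
      else if n > acc.2 ∨ (n = acc.2 ∧ p.1 < acc.1) then (p.1, n) else acc)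
    ("", 0)

-- ===== PORT B =====
def resolve_most_used_py_alt (usage : List (String × Int)) : String × Int :=
  let cleaned := usage.map (fun p => (p.1, rmu_clean p.2))
  match PySem.List.max? (cleaned.map (fun t => t.2)) (fun n => n) with
  | none => ("", 0)                      -- max(…, default=0) on empty, then best ≤ 0
  | some best =>
      if best ≤ 0 then ("", 0)
      else
        match PySem.List.min? ((cleaned.filter (fun t => t.2 = best)).map (fun t => t.1)) (fun s => s) with
        | none => ("", 0)                -- unreachable: best occurs in cleaned
        | some name => (name, best)

-- ===== PRECONDITION & SPEC =====
def Spec_resolve_most_used_py (usage : List (String × Int)) (out : String × Int) : Prop := out = resolve_most_used_py_alt usage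
instance (usage : List (String × Int)) (out : String × Int) : Decidable (Spec_resolve_most_used_py usage out) := by unfold Spec_resolve_most_used_py; infer_instance

-- ===== CLAIM (what is proved, stated in full; the proofs are below) =====
def Claim_equal_resolve_most_used_py : Prop := ∀ (usage : List (String × Int)), Dom_resolve_most_used_py usage → Spec_resolve_most_used_py usage (resolve_most_used_py usage)

-- ===== LEMMAS AND PROOFS =====

/-- A's replacement condition, as a step function on candidate pairs. -/
def rmu_step (acc x : String × Int) : String × Int :=
  if x.2 > acc.2 ∨ (x.2 = acc.2 ∧ x.1 < acc.1) then (x.1, x.2) else acc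

/-- A's loop over the raw list equals folding A's step over the cleaned, positive candidates. -/
theorem rmu_fold_cand (usage : List (String × Int)) (acc : String × Int) :
    usage.foldl
      (fun acc p =>
        let n := rmu_clean p.2
        if n ≤ 0 then acc
        else if n > acc.2 ∨ (n = acc.2 ∧ p.1 < acc.1) then (p.1, n) else acc)
      acc
    = ((usage.map (fun p => (p.1, rmu_clean p.2))).filter (fun t => decide (0 < t.2))).foldl rmu_step acc := by
  induction usage generalizing acc with
  | nil => rfl
  | cons p t ih =>
      simp only [List.foldl_cons, List.map_cons, List.filter_cons]
      by_cases h : (0:Int) < rmu_clean p.2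
      · simp only [h, decide_true, if_pos, List.foldl_cons]
        have hn : ¬ rmu_clean p.2 ≤ 0 := by omega
        rw [if_neg hn]
        exact ih _
      · have hn : rmu_clean p.2 ≤ 0 := by omega
        simp only [h, decide_false, if_neg, Bool.false_eq_true, not_false_iff, if_pos hn]
        exact ih acc

/-- Characterisation of A's running-best fold: the result is one of the inputs (or the
    initial accumulator), its count is maximal, and its name is minimal among entries
    achieving that count. -/
theorem rmu_char (cs : List (String × Int)) (acc : String × Int) :
    cs.foldl rmu_step acc ∈ acc :: cs ∧
    (∀ c ∈ acc :: cs, c.2 ≤ (cs.foldl rmu_step acc).2) ∧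
    (∀ c ∈ acc :: cs, c.2 = (cs.foldl rmu_step acc).2 → (cs.foldl rmu_step acc).1 ≤ c.1) := by
  induction cs generalizing acc with
  | nil =>
      refine ⟨List.mem_cons_self, ?_, ?_⟩ <;> intro c hc <;>
        simp only [List.foldl_nil] <;>
        rcases List.mem_cons.mp hc with h | h
      · exact h ▸ le_refl _
      · exact absurd h (List.not_mem_nil)
      · intro _; exact h ▸ le_refl _
      · exact absurd h (List.not_mem_nil)
  | cons c t ih =>
      simp only [List.foldl_cons]
      obtain ⟨ihm, ihmax, ihtie⟩ := ih (rmu_step acc c)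
      set r := t.foldl rmu_step (rmu_step acc c) with hr
      have hstepmax : (rmu_step acc c).2 ≤ r.2 := ihmax _ List.mem_cons_self
      by_cases hcond : c.2 > acc.2 ∨ (c.2 = acc.2 ∧ c.1 < acc.1)
      · -- step picks c
        have hstep : rmu_step acc c = c := by
          unfold rmu_step; rw [if_pos hcond]
        rw [hstep] at ihm ihmax ihtie hstepmax
        have hac : acc.2 ≤ c.2 := by
          rcases hcond with h | h
          · exact le_of_lt h
          · exact le_of_eq h.1.symm
        refine ⟨?_, ?_, ?_⟩
        · rcases List.mem_cons.mp ihm with h | h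
          · exact h ▸ (by simp)
          · exact List.mem_cons.mpr (Or.inr (List.mem_cons.mpr (Or.inr h)))
        · intro x hx
          rcases List.mem_cons.mp hx with h | h
          · exact h ▸ le_trans hac hstepmax
          · exact ihmax x h
        · intro x hx hx2
          rcases List.mem_cons.mp hx with h | h
          · -- x = acc
            subst h
            have hr1c : c.2 = r.2 → r.1 ≤ c.1 := ihtie c List.mem_cons_self
            rcases hcond with hgt | ⟨heq, hlt⟩
            · exfalso
              -- acc.2 = r.2 but acc.2 < c.2 ≤ r.2
              have := hx2
              omega
            · have hc2r : c.2 = r.2 := by rw [heq]; exact hx2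
              exact le_of_lt (lt_of_le_of_lt (hr1c hc2r) hlt)
          · exact ihtie x h hx2
      · -- step keeps acc
        have hstep : rmu_step acc c = acc := by
          unfold rmu_step; rw [if_neg hcond]
        rw [hstep] at ihm ihmax ihtie hstepmax
        push Not at hcond
        have hca : c.2 ≤ acc.2 := hcond.1
        refine ⟨?_, ?_, ?_⟩
        · rcases List.mem_cons.mp ihm with h | h
          · exact h ▸ List.mem_cons_self
          · exact List.mem_cons.mpr (Or.inr (List.mem_cons.mpr (Or.inr h)))
        · intro x hx
          rcases List.mem_cons.mp hx with h | h
          · exact h ▸ hstepmax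
          · rcases List.mem_cons.mp h with h | h
            · exact h ▸ le_trans hca hstepmax
            · exact ihmax x (List.mem_cons.mpr (Or.inr h))
        · intro x hx hx2
          rcases List.mem_cons.mp hx with h | h
          · exact ihtie x (h ▸ List.mem_cons_self) hx2
          · rcases List.mem_cons.mp h with h | h
            · -- x = c, step rejected c
              subst h
              by_cases heq : x.2 = acc.2
              · have hal : acc.1 ≤ x.1 := le_of_not_gt (hcond.2 heq)
                have : acc.2 = r.2 := by rw [← heq]; exact hx2
                exact le_trans (ihtie acc List.mem_cons_self this) hal
              · exfalso
                -- x.2 < acc.2 ≤ r.2 = x.2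
                have h1 : acc.2 ≤ r.2 := hstepmax
                have h2 : x.2 < acc.2 := lt_of_le_of_ne hca heq
                omega
            · exact ihtie x (List.mem_cons.mpr (Or.inr h)) hx2

-- ===== VERDICT (by name: the statement is the Claim_ definition above) =====
theorem resolve_most_used_py_spec : Claim_equal_resolve_most_used_py := by
  intro usage _
  unfold Spec_resolve_most_used_py resolve_most_used_py
  rw [rmu_fold_cand]
  have halt : resolve_most_used_py_alt usage =
      (match PySem.List.max? (((usage.map (fun p => (p.1, rmu_clean p.2))).map (fun t => t.2))) (fun n => n) with
       | none => ("", 0)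
       | some best =>
           if best ≤ 0 then ("", 0)
           else
             match PySem.List.min? ((((usage.map (fun p => (p.1, rmu_clean p.2))).filter (fun t => t.2 = best)).map (fun t => t.1))) (fun s => s) with
             | none => ("", 0)
             | some name => (name, best)) := rfl
  rw [halt]
  set cleaned := usage.map (fun p => (p.1, rmu_clean p.2)) with hcl
  set cs := cleaned.filter (fun t => decide (0 < t.2)) with hcs
  obtain ⟨hmem, hmax, htie⟩ := rmu_char cs ("", 0)
  set r := cs.foldl rmu_step ("", 0) with hrdef
  cases hM : PySem.List.max? (cleaned.map (fun t => t.2)) (fun n => n) with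
  | none =>
      have hmn : cleaned.map (fun t => t.2) = [] := (PySem.List.max?_eq_none_iff _ _).mp hM
      have hce : cleaned = [] := List.map_eq_nil_iff.mp hmn
      have hcse : cs = [] := by rw [hcs, hce]; rfl
      rw [hrdef, hcse]; rfl
  | some best =>
      show r = if best ≤ 0 then ("", 0)
          else match PySem.List.min? ((cleaned.filter (fun t => decide (t.2 = best))).map (fun t => t.1)) (fun s => s) with
               | none => ("", 0)
               | some name => (name, best)
      have hbestmem : best ∈ cleaned.map (fun t => t.2) := PySem.List.max?_mem hM
      have hbestmax : ∀ y ∈ cleaned.map (fun t => t.2), y ≤ best := PySem.List.max?_isMax hM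
      by_cases hb : best ≤ 0
      · -- no positive count: cs = []
        have hcse : cs = [] := by
          rw [hcs]
          apply List.filter_eq_nil_iff.mpr
          intro t ht
          have := hbestmax t.2 (List.mem_map.mpr ⟨t, ht, rfl⟩)
          simp only [decide_eq_true_eq]; omega
        rw [hrdef, hcse]
        simp only [List.foldl_nil, if_pos hb]
      · rw [if_neg hb]
        push Not at hb
        -- some element of cleaned has count best > 0; it is in cs
        obtain ⟨w, hwmem, hw2⟩ := List.mem_map.mp hbestmem
        have hwcs : w ∈ cs := by
          rw [hcs]; exact List.mem_filter.mpr ⟨hwmem, by simp only [decide_eq_true_eq]; omega⟩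
        have hrw : best ≤ r.2 := hw2 ▸ hmax w (List.mem_cons.mpr (Or.inr hwcs))
        have hrcs : r ∈ cs := by
          rcases List.mem_cons.mp hmem with h | h
          · exfalso; rw [h] at hrw; simp at hrw; omega
          · exact h
        have hrcl : r ∈ cleaned := (List.mem_filter.mp (hcs ▸ hrcs)).1
        have hr2 : r.2 = best :=
          le_antisymm (hbestmax r.2 (List.mem_map.mpr ⟨r, hrcl, rfl⟩)) hrw
        have hnames : r.1 ∈ (cleaned.filter (fun t => decide (t.2 = best))).map (fun t => t.1) :=
          List.mem_map.mpr ⟨r, List.mem_filter.mpr ⟨hrcl, by simp [hr2]⟩, rfl⟩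
        cases hN : PySem.List.min? ((cleaned.filter (fun t => decide (t.2 = best))).map (fun t => t.1)) (fun s => s) with
        | none =>
            exfalso
            have := (PySem.List.min?_eq_none_iff _ _).mp hN
            rw [this] at hnames; exact absurd hnames (List.not_mem_nil)
        | some name =>
            show r = (name, best)
            have hnmem := PySem.List.min?_mem hN
            have hnmin := PySem.List.min?_isMin hN
            obtain ⟨u, humem, hu1⟩ := List.mem_map.mp hnmem
            have hu2 : u.2 = best := by
              have := (List.mem_filter.mp humem).2; simpa using this
            have hucs : u ∈ cs := by
              rw [hcs]
              exact List.mem_filter.mpr ⟨(List.mem_filter.mp humem).1, by simp only [decide_eq_true_eq]; omega⟩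
            have h1 : r.1 ≤ name := hu1 ▸ htie u (List.mem_cons.mpr (Or.inr hucs)) (by rw [hu2, hr2])
            have h2 : name ≤ r.1 := hnmin r.1 hnames
            have hrn : r.1 = name := le_antisymm h1 h2
            calc r = (r.1, r.2) := rfl
              _ = (name, best) := by rw [hrn, hr2]
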